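-- pv_equiv track=rewrite | github.com/CarloGennaro18/Safekey | Modulo_4.py | buscar_recursivo
-- ===== SOURCE A (Python) =====
-- def buscar_recursivo(lista, termino, indice=0, resultados=None):
--     """Busca en una lista de forma recursiva"""
--     if resultados is None:
--         resultados = []
--
--     if indice >= len(lista):
--         return resultados
--
--     elemento = lista[indice]
--     termino_lower = termino.lower()
--
--     # Buscar en servicio y usuario
--     if (termino_lower in elemento['servicio'].lower() or
--         termino_lower in elemento['usuario'].lower()):
--         resultados.append(elemento)
--
--     return buscar_recursivo(lista, termino, indice + 1, resultados)
-- ===== SOURCE B (Python) =====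
-- def buscar_recursivo(lista, termino, indice=0, resultados=None):
--     """Busca en una lista con un bucle acumulador (mismo resultado que la version recursiva)."""
--     if resultados is None:
--         resultados = []
--     termino_lower = termino.lower()
--     for i in range(indice, len(lista)):
--         elemento = lista[i]
--         if (termino_lower in elemento['servicio'].lower() or
--             termino_lower in elemento['usuario'].lower()):
--             resultados.append(elemento)
--     return resultados
-- ===== Notes on version B (the rewrite author's own statement) =====
-- stated objective: simpler
-- what changed: Replaced the tail recursion (one Python call frame per element, which can hit the recursion limit) by a single iterative accumulator loop over range(indice, len(lista)), lowering the search term once instead of once per element; the passed-in resultados list is still extended in place.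
import Mathlib
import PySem

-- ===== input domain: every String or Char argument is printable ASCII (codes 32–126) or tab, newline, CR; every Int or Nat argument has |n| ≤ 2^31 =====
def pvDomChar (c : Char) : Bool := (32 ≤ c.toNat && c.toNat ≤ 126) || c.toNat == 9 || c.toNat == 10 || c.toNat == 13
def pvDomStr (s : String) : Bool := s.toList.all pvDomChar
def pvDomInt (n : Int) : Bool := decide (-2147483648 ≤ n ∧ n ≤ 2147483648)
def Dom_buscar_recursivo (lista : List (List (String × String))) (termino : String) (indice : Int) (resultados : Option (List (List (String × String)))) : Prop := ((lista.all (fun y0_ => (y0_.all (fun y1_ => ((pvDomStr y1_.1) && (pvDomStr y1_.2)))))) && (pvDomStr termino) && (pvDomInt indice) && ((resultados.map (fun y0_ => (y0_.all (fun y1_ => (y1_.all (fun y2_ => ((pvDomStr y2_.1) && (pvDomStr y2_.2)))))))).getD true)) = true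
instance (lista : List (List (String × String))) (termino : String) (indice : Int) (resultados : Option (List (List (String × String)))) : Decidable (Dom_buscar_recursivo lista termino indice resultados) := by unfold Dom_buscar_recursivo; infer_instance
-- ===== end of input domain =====

-- B replaces A's tail recursion (one Python frame per element) by a single iterative
-- accumulator loop over range(indice, len(lista)); same return value, and B performs the
-- same in-place append mutation of a passed-in `resultados` list as A does.

-- ===== PORT A =====
-- the recursive worker: Python's recursion on `indice` (the top-level call resolves the
-- `resultados is None` default once; recursive calls always pass a list)
def buscar_recursivo_go (lista : List (List (String × String))) (termino : String) (indice : Int) (resultados : List (List (String × String))) : List (List (String × String)) :=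
  if (lista.length : Int) ≤ indice then resultados
  else
    let elemento := (PySem.List.pyGet? lista indice).getD []   -- lista[indice]; none (IndexError) only outside Pre_
    let termino_lower := PySem.Str.lower termino
    let resultados :=
      if PySem.Str.isIn termino_lower (PySem.Str.lower (PySem.Dict.getD (PySem.Dict.mk elemento) "servicio" "")) ||
         PySem.Str.isIn termino_lower (PySem.Str.lower (PySem.Dict.getD (PySem.Dict.mk elemento) "usuario" "")) then
        resultados ++ [elemento]
      else resultados
    buscar_recursivo_go lista termino (indice + 1) resultados
termination_by ((lista.length : Int) - indice).toNat
decreasing_by omega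

def buscar_recursivo (lista : List (List (String × String))) (termino : String) (indice : Int) (resultados : Option (List (List (String × String)))) : List (List (String × String)) :=
  buscar_recursivo_go lista termino indice (resultados.getD [])

-- ===== PORT B =====
def buscar_recursivo_alt (lista : List (List (String × String))) (termino : String) (indice : Int) (resultados : Option (List (List (String × String)))) : List (List (String × String)) :=
  let resultados := resultados.getD []
  let termino_lower := PySem.Str.lower termino
  (PySem.List.pyRange indice (lista.length : Int) 1).foldl
    (fun acc i =>
      let elemento := (PySem.List.pyGet? lista i).getD []
      if PySem.Str.isIn termino_lower (PySem.Str.lower (PySem.Dict.getD (PySem.Dict.mk elemento) "servicio" "")) ||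
         PySem.Str.isIn termino_lower (PySem.Str.lower (PySem.Dict.getD (PySem.Dict.mk elemento) "usuario" "")) then
        acc ++ [elemento]
      else acc)
    resultados

-- ===== PRECONDITION & SPEC =====
-- Pre_ holds exactly where the Python A returns normally: either no element is visited
-- (indice ≥ len), or the start index is in range (no IndexError on the first, possibly
-- negative, access) and every visited element has a 'servicio' key and — unless the term
-- already matches 'servicio' (Python's `or` short-circuits) — a 'usuario' key (no KeyError).
def Pre_buscar_recursivo (lista : List (List (String × String))) (termino : String) (indice : Int) (resultados : Option (List (List (String × String)))) : Prop :=
  (lista.length : Int) ≤ indice ∨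
  (-(lista.length : Int) ≤ indice ∧
    ∀ i ∈ PySem.List.pyRange indice (lista.length : Int) 1,
      (PySem.Dict.get? (PySem.Dict.mk ((PySem.List.pyGet? lista i).getD [])) "servicio").isSome = true ∧
      (PySem.Str.isIn (PySem.Str.lower termino)
          (PySem.Str.lower (PySem.Dict.getD (PySem.Dict.mk ((PySem.List.pyGet? lista i).getD [])) "servicio" "")) = true ∨
        (PySem.Dict.get? (PySem.Dict.mk ((PySem.List.pyGet? lista i).getD [])) "usuario").isSome = true))
instance (lista : List (List (String × String))) (termino : String) (indice : Int) (resultados : Option (List (List (String × String)))) : Decidable (Pre_buscar_recursivo lista termino indice resultados) := by unfold Pre_buscar_recursivo; infer_instance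

def pvWitness_buscar_recursivo : (List (List (String × String))) × String × Int × (Option (List (List (String × String)))) :=
  ([[("servicio", "Gmail"), ("usuario", "ana")]], "mail", 0, none)

def Spec_buscar_recursivo (lista : List (List (String × String))) (termino : String) (indice : Int) (resultados : Option (List (List (String × String)))) (out : List (List (String × String))) : Prop := out = buscar_recursivo_alt lista termino indice resultados
instance (lista : List (List (String × String))) (termino : String) (indice : Int) (resultados : Option (List (List (String × String)))) (out : List (List (String × String))) : Decidable (Spec_buscar_recursivo lista termino indice resultados out) := by unfold Spec_buscar_recursivo; infer_instance

-- ===== CLAIM (what is proved, stated in full; the proofs are below) =====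
def Claim_equal_buscar_recursivo : Prop := ∀ (lista : List (List (String × String))) (termino : String) (indice : Int) (resultados : Option (List (List (String × String)))), Dom_buscar_recursivo lista termino indice resultados → Pre_buscar_recursivo lista termino indice resultados → Spec_buscar_recursivo lista termino indice resultados (buscar_recursivo lista termino indice resultados)

-- ===== LEMMAS AND PROOFS =====

-- A's recursion equals B's fold over range(indice, len(lista)) — for every start index
-- and accumulator (the two ports in fact agree on all inputs; Pre_ is not needed here).
theorem go_eq_foldl (lista : List (List (String × String))) (termino : String) :
    ∀ (n : Nat) (indice : Int) (acc : List (List (String × String))),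
      ((lista.length : Int) - indice).toNat = n →
      buscar_recursivo_go lista termino indice acc =
        (PySem.List.pyRange indice (lista.length : Int) 1).foldl
          (fun acc i =>
            let elemento := (PySem.List.pyGet? lista i).getD []
            if PySem.Str.isIn (PySem.Str.lower termino) (PySem.Str.lower (PySem.Dict.getD (PySem.Dict.mk elemento) "servicio" "")) ||
               PySem.Str.isIn (PySem.Str.lower termino) (PySem.Str.lower (PySem.Dict.getD (PySem.Dict.mk elemento) "usuario" "")) then
              acc ++ [elemento]
            else acc)
          acc := by
  intro n
  induction n with
  | zero =>
    intro indice acc h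
    have hle : (lista.length : Int) ≤ indice := by omega
    rw [buscar_recursivo_go, if_pos hle, PySem.List.pyRange_one_eq_nil hle]
    rfl
  | succ k ih =>
    intro indice acc h
    have hlt : indice < (lista.length : Int) := by omega
    rw [buscar_recursivo_go, if_neg (by omega), PySem.List.pyRange_one_cons hlt,
      List.foldl_cons]
    exact ih (indice + 1) _ (by omega)

-- ===== VERDICT (by name: the statement is the Claim_ definition above) =====
theorem buscar_recursivo_spec : Claim_equal_buscar_recursivo := by
  intro lista termino indice resultados _ _
  unfold Spec_buscar_recursivo buscar_recursivo buscar_recursivo_alt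
  exact go_eq_foldl lista termino _ indice (resultados.getD []) rfl
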